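-- pv_equiv track=rewrite | github.com/Daaksh05/EU-AI-Act-Compliance-Checker | backend_logic/metadata_extractor.py | parse_model_card_text
-- ===== SOURCE A (Python) =====
-- def parse_model_card_text(text: str):
--     meta = {"name": None, "purpose": None, "datasets": None, "license": None, "notes": None}
--
--     if not text:
--         return meta
--
--     lines = [l.strip() for l in text.splitlines() if l.strip()]
--
--     for line in lines:
--         if line.lower().startswith("model:"):
--             meta["name"] = line.split(":", 1)[1].strip()
--         elif line.lower().startswith("purpose:"):
--             meta["purpose"] = line.split(":", 1)[1].strip()
--         elif line.lower().startswith("data:"):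
--             meta["datasets"] = line.split(":", 1)[1].strip()
--         elif line.lower().startswith("license:"):
--             meta["license"] = line.split(":", 1)[1].strip()
--         elif line.lower().startswith("notes:"):
--             meta["notes"] = line.split(":", 1)[1].strip()
--
--     return meta
-- ===== SOURCE B (Python) =====
-- FIELDS = [("model:", "name"), ("purpose:", "purpose"), ("data:", "datasets"),
--           ("license:", "license"), ("notes:", "notes")]
--
--
-- def parse_model_card_text(text: str):
--     # Per-field back-to-front search: since the five prefixes are mutually
--     # exclusive, each field's final value is the payload of the LAST line
--     # bearing its prefix (or None).  No mutable dict is threaded through.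
--     lines = [l.strip() for l in text.splitlines() if l.strip()] if text else []
--     meta = {}
--     for prefix, field in FIELDS:
--         meta[field] = next(
--             (l.split(":", 1)[1].strip() for l in reversed(lines)
--              if l.lower().startswith(prefix)),
--             None)
--     return meta
-- ===== Notes on version B (the rewrite author's own statement) =====
-- stated objective: alternative
-- what changed: Instead of one forward pass mutating a dict via an elif prefix chain, B computes each of the five fields independently by searching the lines back-to-front for the last line with that field's prefix (correct because the five prefixes are mutually exclusive, so last-match-wins per field equals A's overwrite semantics).
import Mathlib
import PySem

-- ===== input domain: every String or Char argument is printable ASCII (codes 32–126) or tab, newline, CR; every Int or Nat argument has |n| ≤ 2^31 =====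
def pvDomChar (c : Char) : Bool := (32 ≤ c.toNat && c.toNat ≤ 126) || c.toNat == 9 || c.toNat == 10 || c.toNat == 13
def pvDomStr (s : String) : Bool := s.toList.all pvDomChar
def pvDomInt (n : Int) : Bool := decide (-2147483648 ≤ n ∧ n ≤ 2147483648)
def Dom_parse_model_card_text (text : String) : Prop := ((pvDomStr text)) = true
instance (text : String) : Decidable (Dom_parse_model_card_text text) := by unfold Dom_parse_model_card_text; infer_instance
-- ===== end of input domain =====

-- B replaces A's single forward fold over a mutable dict by five independent
-- back-to-front searches, one per field (the prefixes are mutually exclusive,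
-- so each field's value is the last matching line's payload); objective: alternative.

-- ===== PORT A =====
-- the initial meta dict {"name": None, …}
def pmcInit : PySem.Dict String (Option String) :=
  PySem.Dict.ofList [("name", none), ("purpose", none), ("datasets", none),
                     ("license", none), ("notes", none)]

-- A's line.split(":", 1)  ([1] is taken only under a branch that guarantees a ':')
def pmcSplit1 (line : String) : List String :=
  (PySem.Str.splitMax? line ":" 1).getD []

-- the body of A's for-loop: the elif chain over one (already stripped, nonempty) line
def pmcStepA (d : PySem.Dict String (Option String)) (line : String) :
    PySem.Dict String (Option String) :=
  if PySem.Str.startswith (PySem.Str.lower line) "model:" then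
    d.insert "name" (some (PySem.Str.strip ((pmcSplit1 line).getD 1 "")))
  else if PySem.Str.startswith (PySem.Str.lower line) "purpose:" then
    d.insert "purpose" (some (PySem.Str.strip ((pmcSplit1 line).getD 1 "")))
  else if PySem.Str.startswith (PySem.Str.lower line) "data:" then
    d.insert "datasets" (some (PySem.Str.strip ((pmcSplit1 line).getD 1 "")))
  else if PySem.Str.startswith (PySem.Str.lower line) "license:" then
    d.insert "license" (some (PySem.Str.strip ((pmcSplit1 line).getD 1 "")))
  else if PySem.Str.startswith (PySem.Str.lower line) "notes:" then
    d.insert "notes" (some (PySem.Str.strip ((pmcSplit1 line).getD 1 "")))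
  else d

def parse_model_card_text (text : String) : List (String × Option String) :=
  if text = "" then pmcInit.items
  else
    let lines := ((PySem.Str.splitlines text).map PySem.Str.strip).filter (fun l => l ≠ "")
    (lines.foldl pmcStepA pmcInit).items

-- ===== PORT B =====
-- B's 'l.lower().startswith(prefix)'
def pmcMatch (p l : String) : Bool := PySem.Str.startswith (PySem.Str.lower l) p

-- B's 'l.split(":", 1)[1].strip()' (evaluated only on matching lines, which contain a ':')
def pmcPayload (l : String) : String :=
  PySem.Str.strip (((PySem.Str.splitMax? l ":" 1).getD []).getD 1 "")

-- B's 'next((… for l in reversed(lines) if l.lower().startswith(prefix)), None)'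
def pmcLast (lines : List String) (p : String) : Option String :=
  (lines.reverse.find? (pmcMatch p)).map pmcPayload

def parse_model_card_text_alt (text : String) : List (String × Option String) :=
  let lines := if text = "" then []
    else ((PySem.Str.splitlines text).map PySem.Str.strip).filter (fun l => l ≠ "")
  [("name", pmcLast lines "model:"),
   ("purpose", pmcLast lines "purpose:"),
   ("datasets", pmcLast lines "data:"),
   ("license", pmcLast lines "license:"),
   ("notes", pmcLast lines "notes:")]

-- ===== PRECONDITION & SPEC =====
def Spec_parse_model_card_text (text : String) (out : List (String × Option String)) : Prop := out = parse_model_card_text_alt text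
instance (text : String) (out : List (String × Option String)) : Decidable (Spec_parse_model_card_text text out) := by unfold Spec_parse_model_card_text; infer_instance

-- ===== CLAIM =====
def Claim_equal_parse_model_card_text : Prop := ∀ (text : String), Dom_parse_model_card_text text → Spec_parse_model_card_text text (parse_model_card_text text)

-- ===== LEMMAS AND PROOFS =====

-- a line cannot start (after lowering) with two of the five prefixes: their first chars differ
theorem pmc_not_both (c : List Char) (p q : List Char) (hp : p ≠ []) (hq : q ≠ [])
    (hne : p.head? ≠ q.head?)
    (h1 : PySem.Chars.startswith c p = true) : PySem.Chars.startswith c q = false := by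
  rw [Bool.eq_false_iff]
  intro h2
  obtain ⟨t1, ht1⟩ := (PySem.Chars.startswith_iff _ _).mp h1
  obtain ⟨t2, ht2⟩ := (PySem.Chars.startswith_iff _ _).mp h2
  apply hne
  have e1 : c.head? = p.head? := by
    rw [← ht1, List.head?_append]
    cases p with
    | nil => exact absurd rfl hp
    | cons a l => simp
  have e2 : c.head? = q.head? := by
    rw [← ht2, List.head?_append]
    cases q with
    | nil => exact absurd rfl hq
    | cons a l => simp
  rw [← e1, e2]

-- the same at the String level of pmcMatch
theorem pmc_excl (l p q : String) (hp : p.toList ≠ []) (hq : q.toList ≠ [])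
    (hne : p.toList.head? ≠ q.toList.head?)
    (h : pmcMatch p l = true) : pmcMatch q l = false :=
  pmc_not_both (PySem.Str.lower l).toList p.toList q.toList hp hq hne h

-- peeling one line off the front of B's reversed search
theorem pmc_last_cons (l : String) (rest : List String) (p : String) :
    pmcLast (l :: rest) p
      = (pmcLast rest p).or (if pmcMatch p l then some (pmcPayload l) else none) := by
  unfold pmcLast
  rw [List.reverse_cons, List.find?_append]
  cases hf : rest.reverse.find? (pmcMatch p) with
  | some v => simp
  | none =>
      simp only [List.find?, Option.map_none, Option.none_or]
      cases hm : pmcMatch p l <;> simp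

theorem pmc_step_name (l : String) (a1 a2 a3 a4 a5 : Option String)
    (h : pmcMatch "model:" l = true) :
    pmcStepA (PySem.Dict.mk [("name", a1), ("purpose", a2), ("datasets", a3), ("license", a4), ("notes", a5)]) l = PySem.Dict.mk [("name", some (pmcPayload l)), ("purpose", a2), ("datasets", a3), ("license", a4), ("notes", a5)] := by
  have h' : PySem.Str.startswith (PySem.Str.lower l) "model:" = true := h
  simp only [pmcStepA, h', if_true]
  rfl

theorem pmc_step_purpose (l : String) (a1 a2 a3 a4 a5 : Option String)
    (f1 : pmcMatch "model:" l = false)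
    (h : pmcMatch "purpose:" l = true) :
    pmcStepA (PySem.Dict.mk [("name", a1), ("purpose", a2), ("datasets", a3), ("license", a4), ("notes", a5)]) l = PySem.Dict.mk [("name", a1), ("purpose", some (pmcPayload l)), ("datasets", a3), ("license", a4), ("notes", a5)] := by
  have h' : PySem.Str.startswith (PySem.Str.lower l) "purpose:" = true := h
  have f1' : PySem.Str.startswith (PySem.Str.lower l) "model:" = false := f1
  simp only [pmcStepA, f1', h', Bool.false_eq_true, if_false, if_true]
  rfl

theorem pmc_step_datasets (l : String) (a1 a2 a3 a4 a5 : Option String)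
    (f1 : pmcMatch "model:" l = false)
    (f2 : pmcMatch "purpose:" l = false)
    (h : pmcMatch "data:" l = true) :
    pmcStepA (PySem.Dict.mk [("name", a1), ("purpose", a2), ("datasets", a3), ("license", a4), ("notes", a5)]) l = PySem.Dict.mk [("name", a1), ("purpose", a2), ("datasets", some (pmcPayload l)), ("license", a4), ("notes", a5)] := by
  have h' : PySem.Str.startswith (PySem.Str.lower l) "data:" = true := h
  have f1' : PySem.Str.startswith (PySem.Str.lower l) "model:" = false := f1
  have f2' : PySem.Str.startswith (PySem.Str.lower l) "purpose:" = false := f2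
  simp only [pmcStepA, f1', f2', h', Bool.false_eq_true, if_false, if_true]
  rfl

theorem pmc_step_license (l : String) (a1 a2 a3 a4 a5 : Option String)
    (f1 : pmcMatch "model:" l = false)
    (f2 : pmcMatch "purpose:" l = false)
    (f3 : pmcMatch "data:" l = false)
    (h : pmcMatch "license:" l = true) :
    pmcStepA (PySem.Dict.mk [("name", a1), ("purpose", a2), ("datasets", a3), ("license", a4), ("notes", a5)]) l = PySem.Dict.mk [("name", a1), ("purpose", a2), ("datasets", a3), ("license", some (pmcPayload l)), ("notes", a5)] := by
  have h' : PySem.Str.startswith (PySem.Str.lower l) "license:" = true := h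
  have f1' : PySem.Str.startswith (PySem.Str.lower l) "model:" = false := f1
  have f2' : PySem.Str.startswith (PySem.Str.lower l) "purpose:" = false := f2
  have f3' : PySem.Str.startswith (PySem.Str.lower l) "data:" = false := f3
  simp only [pmcStepA, f1', f2', f3', h', Bool.false_eq_true, if_false, if_true]
  rfl

theorem pmc_step_notes (l : String) (a1 a2 a3 a4 a5 : Option String)
    (f1 : pmcMatch "model:" l = false)
    (f2 : pmcMatch "purpose:" l = false)
    (f3 : pmcMatch "data:" l = false)
    (f4 : pmcMatch "license:" l = false)
    (h : pmcMatch "notes:" l = true) :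
    pmcStepA (PySem.Dict.mk [("name", a1), ("purpose", a2), ("datasets", a3), ("license", a4), ("notes", a5)]) l = PySem.Dict.mk [("name", a1), ("purpose", a2), ("datasets", a3), ("license", a4), ("notes", some (pmcPayload l))] := by
  have h' : PySem.Str.startswith (PySem.Str.lower l) "notes:" = true := h
  have f1' : PySem.Str.startswith (PySem.Str.lower l) "model:" = false := f1
  have f2' : PySem.Str.startswith (PySem.Str.lower l) "purpose:" = false := f2
  have f3' : PySem.Str.startswith (PySem.Str.lower l) "data:" = false := f3
  have f4' : PySem.Str.startswith (PySem.Str.lower l) "license:" = false := f4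
  simp only [pmcStepA, f1', f2', f3', f4', h', Bool.false_eq_true, if_false, if_true]
  rfl

theorem pmc_step_none (l : String) (a1 a2 a3 a4 a5 : Option String)
    (f1 : pmcMatch "model:" l = false)
    (f2 : pmcMatch "purpose:" l = false)
    (f3 : pmcMatch "data:" l = false)
    (f4 : pmcMatch "license:" l = false)
    (f5 : pmcMatch "notes:" l = false)
    : pmcStepA (PySem.Dict.mk [("name", a1), ("purpose", a2), ("datasets", a3), ("license", a4), ("notes", a5)]) l = PySem.Dict.mk [("name", a1), ("purpose", a2), ("datasets", a3), ("license", a4), ("notes", a5)] := by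
  have f1' : PySem.Str.startswith (PySem.Str.lower l) "model:" = false := f1
  have f2' : PySem.Str.startswith (PySem.Str.lower l) "purpose:" = false := f2
  have f3' : PySem.Str.startswith (PySem.Str.lower l) "data:" = false := f3
  have f4' : PySem.Str.startswith (PySem.Str.lower l) "license:" = false := f4
  have f5' : PySem.Str.startswith (PySem.Str.lower l) "notes:" = false := f5
  simp only [pmcStepA, f1', f2', f3', f4', f5', Bool.false_eq_true, if_false]

-- the five-key dict through A's fold, with each slot expressed by B's backward search
theorem pmc_fold (lines : List String) (a1 a2 a3 a4 a5 : Option String) :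
    lines.foldl pmcStepA (PySem.Dict.mk [("name", a1), ("purpose", a2), ("datasets", a3), ("license", a4), ("notes", a5)])
      = PySem.Dict.mk [("name", (pmcLast lines "model:").or a1), ("purpose", (pmcLast lines "purpose:").or a2), ("datasets", (pmcLast lines "data:").or a3), ("license", (pmcLast lines "license:").or a4), ("notes", (pmcLast lines "notes:").or a5)] := by
  induction lines generalizing a1 a2 a3 a4 a5 with
  | nil => simp [pmcLast]
  | cons l rest ih =>
      rw [List.foldl_cons]
      rw [pmc_last_cons l rest "model:", pmc_last_cons l rest "purpose:",
          pmc_last_cons l rest "data:", pmc_last_cons l rest "license:",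
          pmc_last_cons l rest "notes:"]
      by_cases h1 : pmcMatch "model:" l = true
      · have g2 := pmc_excl l "model:" "purpose:" (by decide) (by decide) (by decide) h1
        have g3 := pmc_excl l "model:" "data:" (by decide) (by decide) (by decide) h1
        have g4 := pmc_excl l "model:" "license:" (by decide) (by decide) (by decide) h1
        have g5 := pmc_excl l "model:" "notes:" (by decide) (by decide) (by decide) h1
        rw [pmc_step_name l a1 a2 a3 a4 a5 h1, ih]
        simp only [h1, g2, g3, g4, g5, Bool.false_eq_true, if_false, if_true, Option.or_none,
                   Option.some_or, Option.or_assoc]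
      · have h1f : pmcMatch "model:" l = false := by simpa using h1
        by_cases h2 : pmcMatch "purpose:" l = true
        · have g3 := pmc_excl l "purpose:" "data:" (by decide) (by decide) (by decide) h2
          have g4 := pmc_excl l "purpose:" "license:" (by decide) (by decide) (by decide) h2
          have g5 := pmc_excl l "purpose:" "notes:" (by decide) (by decide) (by decide) h2
          rw [pmc_step_purpose l a1 a2 a3 a4 a5 h1f h2, ih]
          simp only [h1f, h2, g3, g4, g5, Bool.false_eq_true, if_false, if_true, Option.or_none,
                     Option.some_or, Option.or_assoc]
        · have h2f : pmcMatch "purpose:" l = false := by simpa using h2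
          by_cases h3 : pmcMatch "data:" l = true
          · have g4 := pmc_excl l "data:" "license:" (by decide) (by decide) (by decide) h3
            have g5 := pmc_excl l "data:" "notes:" (by decide) (by decide) (by decide) h3
            rw [pmc_step_datasets l a1 a2 a3 a4 a5 h1f h2f h3, ih]
            simp only [h1f, h2f, h3, g4, g5, Bool.false_eq_true, if_false, if_true, Option.or_none,
                       Option.some_or, Option.or_assoc]
          · have h3f : pmcMatch "data:" l = false := by simpa using h3
            by_cases h4 : pmcMatch "license:" l = true
            · have g5 := pmc_excl l "license:" "notes:" (by decide) (by decide) (by decide) h4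
              rw [pmc_step_license l a1 a2 a3 a4 a5 h1f h2f h3f h4, ih]
              simp only [h1f, h2f, h3f, h4, g5, Bool.false_eq_true, if_false, if_true,
                         Option.or_none, Option.some_or, Option.or_assoc]
            · have h4f : pmcMatch "license:" l = false := by simpa using h4
              by_cases h5 : pmcMatch "notes:" l = true
              · rw [pmc_step_notes l a1 a2 a3 a4 a5 h1f h2f h3f h4f h5, ih]
                simp only [h1f, h2f, h3f, h4f, h5, Bool.false_eq_true, if_false, if_true,
                           Option.or_none, Option.some_or, Option.or_assoc]
              · have h5f : pmcMatch "notes:" l = false := by simpa using h5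
                rw [pmc_step_none l a1 a2 a3 a4 a5 h1f h2f h3f h4f h5f, ih]
                simp only [h1f, h2f, h3f, h4f, h5f, Bool.false_eq_true, if_false, Option.or_none]

-- ===== VERDICT =====
theorem parse_model_card_text_spec : Claim_equal_parse_model_card_text := by
  intro text _
  unfold Spec_parse_model_card_text parse_model_card_text parse_model_card_text_alt
  by_cases h : text = ""
  · simp only [h, if_true]
    rfl
  · simp only [h, if_false]
    have hinit : pmcInit = PySem.Dict.mk [("name", none), ("purpose", none), ("datasets", none),
        ("license", none), ("notes", none)] := rfl
    rw [hinit, pmc_fold]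
    simp
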